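-- pv_equiv track=rewrite | github.com/devanuraglanjewar/Snowflake_schema_evo_chatbot | schema_utils.py | compare_schemas
-- ===== SOURCE A (Python) =====
-- from typing import Dict, Tuple, List
--
-- def compare_schemas(existing: Dict[str, str], new: Dict[str, str]) -> Tuple[List[str], List[str], List[str]]:
--     new_cols = sorted(list(set(new) - set(existing)))
--     missing_cols = sorted(list(set(existing) - set(new)))
--     conflicts = []
--     for col in set(existing).intersection(new):
--         if existing[col] != new[col]:
--             conflicts.append(col)
--     conflicts.sort()
--     return new_cols, missing_cols, conflicts
-- ===== SOURCE B (Python) =====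
-- def compare_schemas(existing, new):
--     new_cols, missing_cols, conflicts = [], [], []
--     for col in dict.fromkeys(list(existing) + list(new)):
--         if col not in existing:
--             new_cols.append(col)
--         elif col not in new:
--             missing_cols.append(col)
--         elif existing[col] != new[col]:
--             conflicts.append(col)
--     new_cols.sort()
--     missing_cols.sort()
--     conflicts.sort()
--     return new_cols, missing_cols, conflicts
-- ===== Notes on version B (the rewrite author's own statement) =====
-- stated objective: alternative
-- what changed: Replaces A's two set-differences plus a separate intersection loop (four set constructions, three passes) with one classifying pass over the deduplicated union of keys that appends each key to exactly one of the three lists, then sorts the three lists.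
import Mathlib
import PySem

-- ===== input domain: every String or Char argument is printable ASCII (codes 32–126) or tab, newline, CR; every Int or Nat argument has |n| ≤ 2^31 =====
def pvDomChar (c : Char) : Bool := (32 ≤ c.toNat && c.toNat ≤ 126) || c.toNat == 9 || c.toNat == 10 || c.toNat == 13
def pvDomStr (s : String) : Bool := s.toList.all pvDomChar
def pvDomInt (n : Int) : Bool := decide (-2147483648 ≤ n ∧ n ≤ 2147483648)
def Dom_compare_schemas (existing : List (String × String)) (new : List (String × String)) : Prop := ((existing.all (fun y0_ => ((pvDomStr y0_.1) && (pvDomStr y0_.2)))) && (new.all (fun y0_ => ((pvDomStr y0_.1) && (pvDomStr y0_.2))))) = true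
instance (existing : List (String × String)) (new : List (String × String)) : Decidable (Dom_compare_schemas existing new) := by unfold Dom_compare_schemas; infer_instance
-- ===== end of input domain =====

-- B replaces A's two set-differences and separate intersection loop with one classifying pass
-- over the deduplicated union of keys (objective: alternative; same asymptotic cost).


-- ===== PORT A =====
-- the dict parameters arrive as association lists; PySem.Dict.ofList is the Python dict they denote.
-- existing[col] / new[col] are compared via get? (exact: col is a key of both dicts there);
-- the set-iteration order of the conflicts loop feeds only a list that is sorted afterwards.
def compare_schemas (existing : List (String × String)) (new : List (String × String)) : List String × List String × List String :=
  (PySem.List.sorted (PySem.Set.diff (PySem.Set.ofList (PySem.Dict.ofList new).keys) (PySem.Set.ofList (PySem.Dict.ofList existing).keys)) (fun x => x) false,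
   PySem.List.sorted (PySem.Set.diff (PySem.Set.ofList (PySem.Dict.ofList existing).keys) (PySem.Set.ofList (PySem.Dict.ofList new).keys)) (fun x => x) false,
   PySem.List.sorted
     ((PySem.Set.inter (PySem.Set.ofList (PySem.Dict.ofList existing).keys) (PySem.Dict.ofList new).keys).foldl
       (fun acc col => if (PySem.Dict.ofList existing).get? col ≠ (PySem.Dict.ofList new).get? col then acc ++ [col] else acc) [])
     (fun x => x) false)

-- ===== PORT B =====
-- one classifying pass over dict.fromkeys(list(existing) + list(new)), then sort the three lists
def pvClassify (e n : PySem.Dict String String) (acc : List String × List String × List String) (col : String) : List String × List String × List String :=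
  match e.get? col, n.get? col with
  | none, _ => (acc.1 ++ [col], acc.2.1, acc.2.2)
  | some _, none => (acc.1, acc.2.1 ++ [col], acc.2.2)
  | some ve, some vn => if ve ≠ vn then (acc.1, acc.2.1, acc.2.2 ++ [col]) else acc

def compare_schemas_alt (existing : List (String × String)) (new : List (String × String)) : List String × List String × List String :=
  let e : PySem.Dict String String := PySem.Dict.ofList existing
  let n : PySem.Dict String String := PySem.Dict.ofList new
  let acc := (PySem.List.dedup (e.keys ++ n.keys)).foldl (pvClassify e n) ([], [], [])
  (PySem.List.sorted acc.1 (fun x => x) false,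
   PySem.List.sorted acc.2.1 (fun x => x) false,
   PySem.List.sorted acc.2.2 (fun x => x) false)

-- ===== PRECONDITION & SPEC =====
def Spec_compare_schemas (existing : List (String × String)) (new : List (String × String)) (out : List String × List String × List String) : Prop := out = compare_schemas_alt existing new
instance (existing : List (String × String)) (new : List (String × String)) (out : List String × List String × List String) : Decidable (Spec_compare_schemas existing new out) := by unfold Spec_compare_schemas; infer_instance

-- ===== CLAIM (what is proved, stated in full; the proofs are below) =====
def Claim_equal_compare_schemas : Prop := ∀ (existing : List (String × String)) (new : List (String × String)), Dom_compare_schemas existing new → Spec_compare_schemas existing new (compare_schemas existing new)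

-- ===== LEMMAS AND PROOFS =====

-- B's single loop, characterised: it appends to each component the keys passing that component's test
theorem pv_foldl_classify (e n : PySem.Dict String String) (l : List String)
    (acc : List String × List String × List String) :
    l.foldl (pvClassify e n) acc =
    (acc.1 ++ l.filter (fun col => (e.get? col).isNone),
     acc.2.1 ++ l.filter (fun col => (e.get? col).isSome && (n.get? col).isNone),
     acc.2.2 ++ l.filter (fun col => (e.get? col).isSome && (n.get? col).isSome && (e.get? col ≠ n.get? col))) := by
  induction l generalizing acc with
  | nil => simp
  | cons x xs ih =>
    simp only [List.foldl_cons, List.filter_cons]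
    rcases he : e.get? x with _ | ve <;> rcases hn : n.get? x with _ | vn <;>
      simp only [pvClassify, he, hn, ih] <;> simp
    by_cases hv : ve = vn <;> simp [hv]

theorem pv_sorted_eq_of_same_mem (xs ys : List String) (hx : xs.Nodup) (hy : ys.Nodup)
    (h : ∀ a, a ∈ xs ↔ a ∈ ys) :
    PySem.List.sorted xs (fun x => x) false = PySem.List.sorted ys (fun x => x) false :=
  PySem.List.sorted_eq_sorted_of_perm xs ys (fun x => x) (fun _ _ h => h)
    ((List.perm_ext_iff_of_nodup hx hy).mpr h)

-- ===== VERDICT (by name: the statement is the Claim_ definition above) =====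
theorem compare_schemas_spec : Claim_equal_compare_schemas := by
  intro existing new _
  unfold Spec_compare_schemas compare_schemas compare_schemas_alt
  simp only [pv_foldl_classify, PySem.List.foldl_append_ite_eq_filter, List.nil_append]
  have hE : ∀ a, a ∈ (PySem.Dict.ofList existing).keys ↔ ((PySem.Dict.ofList existing).get? a).isSome = true := by
    intro a
    rw [← PySem.Dict.contains_iff_mem_keys, PySem.Dict.contains_eq_isSome_get?]
  have hN : ∀ a, a ∈ (PySem.Dict.ofList new).keys ↔ ((PySem.Dict.ofList new).get? a).isSome = true := by
    intro a
    rw [← PySem.Dict.contains_iff_mem_keys, PySem.Dict.contains_eq_isSome_get?]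
  simp only [Prod.mk.injEq]
  refine ⟨?_, ?_, ?_⟩
  · refine pv_sorted_eq_of_same_mem _ _
      (PySem.Set.nodup_diff _ _ (PySem.Set.nodup_ofList _))
      ((PySem.List.nodup_dedup _).filter _) ?_
    intro a
    have h1 := hE a; have h2 := hN a
    simp only [PySem.Set.mem_diff, PySem.Set.mem_ofList, List.mem_filter,
      PySem.List.mem_dedup, List.mem_append]
    cases hg : (PySem.Dict.ofList existing).get? a <;>
      cases hg2 : (PySem.Dict.ofList new).get? a <;>
      rw [hg] at h1 <;> rw [hg2] at h2 <;> simp_all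
  · refine pv_sorted_eq_of_same_mem _ _
      (PySem.Set.nodup_diff _ _ (PySem.Set.nodup_ofList _))
      ((PySem.List.nodup_dedup _).filter _) ?_
    intro a
    have h1 := hE a; have h2 := hN a
    simp only [PySem.Set.mem_diff, PySem.Set.mem_ofList, List.mem_filter,
      PySem.List.mem_dedup, List.mem_append]
    cases hg : (PySem.Dict.ofList existing).get? a <;>
      cases hg2 : (PySem.Dict.ofList new).get? a <;>
      rw [hg] at h1 <;> rw [hg2] at h2 <;> simp_all
  · refine pv_sorted_eq_of_same_mem _ _
      ((PySem.Set.nodup_inter _ _ (PySem.Set.nodup_ofList _)).filter _)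
      ((PySem.List.nodup_dedup _).filter _) ?_
    intro a
    have h1 := hE a; have h2 := hN a
    simp only [PySem.Set.mem_inter, PySem.Set.mem_ofList, List.mem_filter,
      PySem.List.mem_dedup, List.mem_append]
    cases hg : (PySem.Dict.ofList existing).get? a <;>
      cases hg2 : (PySem.Dict.ofList new).get? a <;>
      rw [hg] at h1 <;> rw [hg2] at h2 <;> simp_all
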